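-- pv_equiv track=rewrite | github.com/ukkodeveloper/algorithm | programmers/주식가격.py | solution
-- ===== SOURCE A (Python) =====
-- def solution(prices):
--     stack = []
--     n = len(prices)
--     result = [0] * n
--
--     for i, price in enumerate(prices):
--         while stack and price < prices[stack[-1]]:
--             j = stack.pop()
--             result[j] = i - j
--         stack.append(i)
--
--     while stack:
--         j = stack.pop()
--         result[j] = n - 1 - j
--
--     return result
-- ===== SOURCE B (Python) =====
-- def solution(prices):
--     result = []
--     for i, price in enumerate(prices):
--         count = 0
--         for p in prices[i+1:]:
--             count += 1
--             if p < price: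
--                 break
--         result.append(count)
--     return result
-- ===== Notes on version B (the rewrite author's own statement) =====
-- stated objective: simpler
-- what changed: Replaced the monotonic-stack single pass (pop indices when a lower price arrives, then flush the stack) with the direct brute-force scan: for each index, count forward until the first strictly lower price (inclusive) or the end of the list.
import Mathlib
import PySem

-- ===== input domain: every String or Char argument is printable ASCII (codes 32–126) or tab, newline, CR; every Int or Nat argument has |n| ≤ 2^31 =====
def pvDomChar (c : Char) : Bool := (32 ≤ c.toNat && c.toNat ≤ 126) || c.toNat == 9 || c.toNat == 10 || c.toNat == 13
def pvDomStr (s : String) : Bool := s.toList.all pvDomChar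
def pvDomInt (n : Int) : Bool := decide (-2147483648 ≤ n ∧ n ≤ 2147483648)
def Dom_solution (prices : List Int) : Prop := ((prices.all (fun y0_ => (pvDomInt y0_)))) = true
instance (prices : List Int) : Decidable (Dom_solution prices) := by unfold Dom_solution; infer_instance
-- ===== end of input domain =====

-- B replaces A's monotonic-stack pass by the plain brute-force forward scan; return values proved equal on all inputs.

-- ===== PORT A =====
-- inner `while stack and price < prices[stack[-1]]`: stack top is the list head;
-- indices are always in range, `prices[j]` ported as getD.
def pvPop (P : List Int) (i : Nat) (price : Int) :
    List Nat → List Int → List Nat × List Int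
  | [], result => ([], result)
  | j :: rest, result =>
    if price < P.getD j 0 then
      pvPop P i price rest (result.set j ((i : Int) - (j : Int)))
    else (j :: rest, result)

-- `for i, price in enumerate(prices)` ported as structural recursion over the list
-- carrying the index counter i (exact: visits (0, prices[0]), (1, prices[1]), …).
def pvMain (P : List Int) : List Int → Nat → List Nat → List Int → List Nat × List Int
  | [], _, stack, result => (stack, result)
  | price :: ps, i, stack, result =>
    let sr := pvPop P i price stack result
    pvMain P ps (i + 1) (i :: sr.1) sr.2

-- final `while stack: j = stack.pop(); result[j] = n - 1 - j`
def pvFinal (n : Nat) : List Nat → List Int → List Int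
  | [], result => result
  | j :: rest, result => pvFinal n rest (result.set j ((n : Int) - 1 - (j : Int)))

def solution (prices : List Int) : List Int :=
  let n := prices.length
  let sr := pvMain prices prices 0 [] (List.replicate n 0)
  pvFinal n sr.1 sr.2

-- ===== PORT B =====
-- inner `for p in prices[i+1:]: count += 1; if p < price: break`
def pvCnt (price : Int) : List Int → Int
  | [] => 0
  | x :: xs => if x < price then 1 else 1 + pvCnt price xs

-- outer loop over i ported as recursion over suffixes: at position i the slice
-- prices[i+1:] is exactly the tail of the current suffix.
def solution_alt : List Int → List Int
  | [] => []
  | x :: xs => pvCnt x xs :: solution_alt xs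

-- ===== PRECONDITION & SPEC =====
def Spec_solution (prices : List Int) (out : List Int) : Prop := out = solution_alt prices
instance (prices : List Int) (out : List Int) : Decidable (Spec_solution prices out) := by unfold Spec_solution; infer_instance

-- ===== CLAIM (what is proved, stated in full; the proofs are below) =====
def Claim_equal_solution : Prop := ∀ (prices : List Int), Dom_solution prices → Spec_solution prices (solution prices)

-- ===== LEMMAS AND PROOFS =====

-- the common value: answer at index j is the forward count until the first drop
def pvAns (P : List Int) (j : Nat) : Int := pvCnt (P.getD j 0) (P.drop (j + 1))

-- "no price in positions (j, m) is below P[j]"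
def pvNoDrop (P : List Int) (j m : Nat) : Prop :=
  ∀ k, j < k → k < m → P.getD j 0 ≤ P.getD k 0

theorem pvCnt_ge (p : Int) (l : List Int) (h : ∀ x ∈ l, p ≤ x) :
    pvCnt p l = (l.length : Int) := by
  induction l with
  | nil => rfl
  | cons x xs ih =>
    have hx := h x (by simp)
    simp only [pvCnt, if_neg (not_lt.2 hx), ih (fun y hy => h y (by simp [hy]))]
    push_cast [List.length_cons]; omega

theorem pvCnt_append (p : Int) (l1 : List Int) (x : Int) (l2 : List Int)
    (h1 : ∀ y ∈ l1, p ≤ y) (hx : x < p) :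
    pvCnt p (l1 ++ x :: l2) = (l1.length : Int) + 1 := by
  induction l1 with
  | nil => simp [pvCnt, if_pos hx]
  | cons y ys ih =>
    have hy := h1 y (by simp)
    simp only [List.cons_append, pvCnt, if_neg (not_lt.2 hy),
      ih (fun z hz => h1 z (by simp [hz]))]
    push_cast [List.length_cons]; omega

theorem pvAns_noDrop {P : List Int} {j : Nat} (hj : j < P.length)
    (h : pvNoDrop P j P.length) : pvAns P j = (P.length : Int) - 1 - (j : Int) := by
  have hall : ∀ x ∈ P.drop (j + 1), P.getD j 0 ≤ x := by
    intro x hx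
    obtain ⟨k, hk, rfl⟩ := List.mem_iff_getElem.1 hx
    have hk' : j + 1 + k < P.length := by
      have hld : (P.drop (j + 1)).length = P.length - (j + 1) := List.length_drop
      omega
    rw [List.getElem_drop]
    have := h (j + 1 + k) (by omega) hk'
    rwa [List.getD_eq_getElem P 0 hk'] at this
  unfold pvAns
  rw [pvCnt_ge _ _ hall, List.length_drop]
  omega

theorem pvAns_dropAt {P : List Int} {j i : Nat} (hji : j < i) (hi : i < P.length)
    (h : pvNoDrop P j i) (hd : P.getD i 0 < P.getD j 0) :
    pvAns P j = (i : Int) - (j : Int) := by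
  have hsplit : P.drop (j + 1) = (P.drop (j + 1)).take (i - (j + 1)) ++
      (P.getD i 0 :: P.drop (i + 1)) := by
    have h1 : P.drop i = P.getD i 0 :: P.drop (i + 1) := by
      rw [List.getD_eq_getElem P 0 hi]
      exact (List.getElem_cons_drop hi).symm
    conv_lhs => rw [← List.take_append_drop (i - (j + 1)) (P.drop (j + 1))]
    rw [List.drop_drop]
    have heq : j + 1 + (i - (j + 1)) = i := by omega
    rw [heq, h1]
  have hall : ∀ y ∈ (P.drop (j + 1)).take (i - (j + 1)), P.getD j 0 ≤ y := by
    intro y hy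
    obtain ⟨k, hk, rfl⟩ := List.mem_iff_getElem.1 hy
    have hklt : k < i - (j + 1) := by
      have hlt : ((P.drop (j + 1)).take (i - (j + 1))).length =
          min (i - (j + 1)) ((P.drop (j + 1)).length) := List.length_take
      omega
    have hk2 : j + 1 + k < P.length := by omega
    rw [List.getElem_take, List.getElem_drop]
    have := h (j + 1 + k) (by omega) (by omega)
    rwa [List.getD_eq_getElem P 0 hk2] at this
  have hlen : ((P.drop (j + 1)).take (i - (j + 1))).length = i - (j + 1) := by
    have hld : (P.drop (j + 1)).length = P.length - (j + 1) := List.length_drop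
    rw [List.length_take]; omega
  unfold pvAns
  rw [hsplit, pvCnt_append _ _ _ _ hall hd, hlen]
  omega

theorem getD_set_self {l : List Int} {j : Nat} {v : Int} (h : j < l.length) :
    (l.set j v).getD j 0 = v := by
  simp [List.getD, h]

theorem getD_set_ne {l : List Int} {j k : Nat} {v : Int} (h : k ≠ j) :
    (l.set j v).getD k 0 = l.getD k 0 := by
  simp [List.getD, List.getElem?_set_ne (Ne.symm h)]

-- the inner while loop: pops exactly the top segment with price < P[top],
-- recording the final answer for each popped index
theorem pvPop_spec (P : List Int) (i : Nat) (price : Int)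
    (hpi : price = P.getD i 0) (hi : i < P.length) :
    ∀ stack result,
    (∀ j ∈ stack, j < i ∧ pvNoDrop P j i) →
    List.Pairwise (fun a b => b < a) stack →
    result.length = P.length →
    (∀ j, j < P.length → result.getD j 0 =
      if j < i ∧ j ∉ stack then pvAns P j else 0) →
    (∀ j ∈ (pvPop P i price stack result).1, j ∈ stack ∧ P.getD j 0 ≤ price) ∧
    (∀ j ∈ stack, j ∉ (pvPop P i price stack result).1 → price < P.getD j 0) ∧
    List.Pairwise (fun a b => b < a) (pvPop P i price stack result).1 ∧
    (pvPop P i price stack result).2.length = P.length ∧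
    (∀ j, j < P.length → (pvPop P i price stack result).2.getD j 0 =
      if j < i ∧ j ∉ (pvPop P i price stack result).1 then pvAns P j else 0) := by
  intro stack
  induction stack with
  | nil =>
    intro result _ _ hlen hres
    simp only [pvPop]
    exact ⟨by simp, by simp, List.Pairwise.nil, hlen, hres⟩
  | cons j rest ih =>
    intro result hmem hpw hlen hres
    obtain ⟨hji, hjnd⟩ := hmem j (by simp)
    by_cases hc : price < P.getD j 0
    · -- pop j
      have hjn : j < P.length := by omega
      have hjrest : j ∉ rest := by
        intro hmemj
        have := (List.pairwise_cons.1 hpw).1 j hmemj; omega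
      have hansj : pvAns P j = (i : Int) - (j : Int) :=
        pvAns_dropAt hji hi hjnd (by rw [← hpi]; exact hc)
      have hres' : ∀ k, k < P.length →
          (result.set j ((i : Int) - (j : Int))).getD k 0 =
          if k < i ∧ k ∉ rest then pvAns P k else 0 := by
        intro k hk
        by_cases hkj : k = j
        · subst hkj
          rw [getD_set_self (by omega)]
          rw [if_pos ⟨hji, hjrest⟩, hansj]
        · rw [getD_set_ne hkj, hres k hk]
          have : (k ∉ j :: rest) ↔ (k ∉ rest) := by simp [hkj]
          simp only [this]
      have hIH := ih (result.set j ((i : Int) - (j : Int)))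
        (fun k hk => hmem k (by simp [hk]))
        (List.pairwise_cons.1 hpw).2
        (by rw [List.length_set]; exact hlen)
        hres'
      simp only [pvPop, if_pos hc]
      refine ⟨?_, ?_, hIH.2.2.1, hIH.2.2.2.1, hIH.2.2.2.2⟩
      · intro k hk
        obtain ⟨hk1, hk2⟩ := hIH.1 k hk
        exact ⟨by simp [hk1], hk2⟩
      · intro k hk hk'
        rcases List.mem_cons.1 hk with rfl | hkr
        · exact hc
        · exact hIH.2.1 k hkr hk'
    · -- stop: price ≥ P[j]
      have hstop : ∀ k ∈ j :: rest, P.getD k 0 ≤ price := by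
        intro k hk
        rcases List.mem_cons.1 hk with rfl | hkr
        · exact not_lt.1 hc
        · have hkj : k < j := (List.pairwise_cons.1 hpw).1 k hkr
          obtain ⟨hki, hknd⟩ := hmem k (by simp [hkr])
          have h1 : P.getD k 0 ≤ P.getD j 0 := hknd j hkj hji
          exact le_trans h1 (not_lt.1 hc)
      simp only [pvPop, if_neg hc]
      exact ⟨fun k hk => ⟨hk, hstop k hk⟩, fun k hk hk' => absurd hk hk',
        hpw, hlen, hres⟩

-- the main enumerate loop, by induction on the remaining suffix
theorem pvMain_spec (P : List Int) :
    ∀ ps i stack result,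
    P.drop i = ps →
    (∀ j ∈ stack, j < i ∧ j < P.length ∧ pvNoDrop P j i) →
    List.Pairwise (fun a b => b < a) stack →
    result.length = P.length →
    (∀ j, j < P.length → result.getD j 0 =
      if j < i ∧ j ∉ stack then pvAns P j else 0) →
    (∀ j ∈ (pvMain P ps i stack result).1, j < P.length ∧ pvNoDrop P j P.length) ∧
    List.Pairwise (fun a b => b < a) (pvMain P ps i stack result).1 ∧
    (pvMain P ps i stack result).2.length = P.length ∧
    (∀ j, j < P.length → (pvMain P ps i stack result).2.getD j 0 =
      if j ∉ (pvMain P ps i stack result).1 then pvAns P j else 0) := by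
  intro ps
  induction ps with
  | nil =>
    intro i stack result hdrop hmem hpw hlen hres
    have hlei : P.length ≤ i := by
      by_contra hlt
      have : P.drop i ≠ [] := by
        apply List.ne_nil_of_length_pos
        rw [List.length_drop]; omega
      exact this hdrop
    simp only [pvMain]
    refine ⟨?_, hpw, hlen, ?_⟩
    · intro j hj
      obtain ⟨hji, hjn, hnd⟩ := hmem j hj
      exact ⟨hjn, fun k hk1 hk2 => hnd k hk1 (by omega)⟩
    · intro j hj
      rw [hres j hj]
      have : j < i := by omega
      simp only [this, true_and]
      rfl

  | cons price ps' ih =>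
    intro i stack result hdrop hmem hpw hlen hres
    have hi : i < P.length := by
      by_contra h
      rw [List.drop_eq_nil_of_le (by omega)] at hdrop
      exact List.cons_ne_nil _ _ hdrop.symm
    have hpi : price = P.getD i 0 := by
      have h1 : P.drop i = P.getD i 0 :: P.drop (i + 1) := by
        rw [List.getD_eq_getElem P 0 hi]
        exact (List.getElem_cons_drop hi).symm
      rw [h1] at hdrop
      exact (List.cons.injEq .. ▸ hdrop).1.symm
    have hdrop' : P.drop (i + 1) = ps' := by
      have h1 : P.drop i = P.getD i 0 :: P.drop (i + 1) := by
        rw [List.getD_eq_getElem P 0 hi]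
        exact (List.getElem_cons_drop hi).symm
      rw [h1] at hdrop
      exact (List.cons.injEq .. ▸ hdrop).2
    have hP := pvPop_spec P i price hpi hi stack result
      (fun j hj => ⟨(hmem j hj).1, (hmem j hj).2.2⟩) hpw hlen hres
    obtain ⟨hs1, hs2, hs3, hs4, hs5⟩ := hP
    set s' := (pvPop P i price stack result).1 with hs'
    set r' := (pvPop P i price stack result).2 with hr'
    have hsub : ∀ j ∈ s', j ∈ stack := fun j hj => (hs1 j hj).1
    -- new invariants at i+1 with stack (i :: s')
    have hmem' : ∀ j ∈ i :: s', j < i + 1 ∧ j < P.length ∧ pvNoDrop P j (i + 1) := by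
      intro j hj
      rcases List.mem_cons.1 hj with rfl | hjs
      · exact ⟨by omega, hi, fun k hk1 hk2 => absurd hk2 (by omega)⟩
      · obtain ⟨hji, hjn, hnd⟩ := hmem j (hsub j hjs)
        refine ⟨by omega, hjn, fun k hk1 hk2 => ?_⟩
        by_cases hki : k = i
        · subst hki
          have := (hs1 j hjs).2
          rwa [hpi] at this
        · exact hnd k hk1 (by omega)
    have hpw' : List.Pairwise (fun a b => b < a) (i :: s') := by
      rw [List.pairwise_cons]
      exact ⟨fun b hb => (hmem b (hsub b hb)).1, hs3⟩
    have hres' : ∀ j, j < P.length → r'.getD j 0 =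
        if j < i + 1 ∧ j ∉ i :: s' then pvAns P j else 0 := by
      intro j hj
      rw [hs5 j hj]
      by_cases hji : j = i
      · subst hji
        simp only [List.mem_cons, not_or]
        rw [if_neg (by omega), if_neg (by simp)]
      · have h1 : (j < i + 1 ∧ j ∉ i :: s') ↔ (j < i ∧ j ∉ s') := by
          simp only [List.mem_cons, not_or]
          constructor
          · rintro ⟨h2, h3, h4⟩; exact ⟨by omega, h4⟩
          · rintro ⟨h2, h3⟩; exact ⟨by omega, hji, h3⟩
        simp only [h1]
    have := ih (i + 1) (i :: s') r' hdrop' hmem' hpw' hs4 hres'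
    simpa only [pvMain] using this

-- the final flush loop
theorem pvFinal_spec (P : List Int) :
    ∀ stack result,
    (∀ j ∈ stack, j < P.length ∧ pvNoDrop P j P.length) →
    List.Pairwise (fun a b => b < a) stack →
    result.length = P.length →
    (∀ j, j < P.length → result.getD j 0 =
      if j ∉ stack then pvAns P j else 0) →
    (pvFinal P.length stack result).length = P.length ∧
    (∀ j, j < P.length → (pvFinal P.length stack result).getD j 0 = pvAns P j) := by
  intro stack
  induction stack with
  | nil =>
    intro result _ _ hlen hres
    exact ⟨hlen, fun j hj => by rw [pvFinal, hres j hj, if_pos (by simp)]⟩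
  | cons j rest ih =>
    intro result hmem hpw hlen hres
    obtain ⟨hjn, hjnd⟩ := hmem j (by simp)
    have hjrest : j ∉ rest := by
      intro hmemj
      have := (List.pairwise_cons.1 hpw).1 j hmemj; omega
    have hansj : pvAns P j = (P.length : Int) - 1 - (j : Int) := pvAns_noDrop hjn hjnd
    have hres' : ∀ k, k < P.length →
        (result.set j ((P.length : Int) - 1 - (j : Int))).getD k 0 =
        if k ∉ rest then pvAns P k else 0 := by
      intro k hk
      by_cases hkj : k = j
      · subst hkj
        rw [getD_set_self (by omega), if_pos hjrest, hansj]
      · rw [getD_set_ne hkj, hres k hk]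
        by_cases hkr : k ∈ rest
        · rw [if_neg (by simp [hkr]), if_neg (by simp [hkr])]
        · rw [if_pos (by simp [hkj, hkr]), if_pos hkr]
    have := ih (result.set j ((P.length : Int) - 1 - (j : Int)))
      (fun k hk => hmem k (by simp [hk]))
      (List.pairwise_cons.1 hpw).2
      (by rw [List.length_set]; exact hlen)
      hres'
    simpa only [pvFinal] using this

-- characterisation of A's result
theorem solution_char (P : List Int) :
    (solution P).length = P.length ∧
    (∀ j, j < P.length → (solution P).getD j 0 = pvAns P j) := by
  have hM := pvMain_spec P P 0 [] (List.replicate P.length 0)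
    (by simp) (by simp) List.Pairwise.nil (by simp)
    (by intro j hj; rw [if_neg (by omega)]; simp [List.getD, hj])
  obtain ⟨hm1, hm2, hm3, hm4⟩ := hM
  exact pvFinal_spec P _ _ hm1 hm2 hm3 hm4

-- characterisation of B's result
theorem solution_alt_char (P : List Int) :
    (solution_alt P).length = P.length ∧
    (∀ j, j < P.length → (solution_alt P).getD j 0 = pvAns P j) := by
  induction P with
  | nil => exact ⟨rfl, fun j hj => absurd hj (by simp)⟩
  | cons x xs ih =>
    refine ⟨by simp [solution_alt, ih.1], fun j hj => ?_⟩
    cases j with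
    | zero => simp [solution_alt, List.getD, pvAns]
    | succ k =>
      have hk : k < xs.length := by simpa using hj
      have h1 : (solution_alt (x :: xs)).getD (k + 1) 0 = (solution_alt xs).getD k 0 := by
        simp [solution_alt, List.getD]
      rw [h1, ih.2 k hk]
      simp [pvAns, List.getD]

-- ===== VERDICT (by name: the statement is the Claim_ definition above) =====
theorem solution_spec : Claim_equal_solution := by
  intro prices _
  unfold Spec_solution
  obtain ⟨hA1, hA2⟩ := solution_char prices
  obtain ⟨hB1, hB2⟩ := solution_alt_char prices
  apply List.ext_getElem (by omega)
  intro j hj1 hj2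
  have hj : j < prices.length := by omega
  rw [← List.getD_eq_getElem _ 0 hj1, ← List.getD_eq_getElem _ 0 hj2,
    hA2 j hj, hB2 j hj]
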